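-- pv_equiv track=rewrite | github.com/szjasinski/chess | figure_normal_moves_functions.py | right_top_diagonal
-- ===== SOURCE A (Python) =====
-- def right_top_diagonal(coords):
--     diagonal_coords_list = []
--
--     (x, y) = coords
--     while x >= 0 and y <= 7:
--         if (x, y) != coords:
--             diagonal_coords_list.append((x, y))
--         x = x - 1
--         y = y + 1
--
--     return diagonal_coords_list
-- ===== SOURCE B (Python) =====
-- def right_top_diagonal(coords):
--     # Squares strictly before (x, y) on the anti-diagonal of constant sum
--     # s = x + y, tracked by the file a alone (rank recovered as s - a).
--     # Walk from the board-edge end of the diagonal (file max(0, s - 7))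
--     # upward toward the start, then reverse into A's emission order.
--     (x, y) = coords
--     s = x + y
--     out = []
--     a = max(0, s - 7)
--     while a < x:
--         out.append((a, s - a))
--         a += 1
--     out.reverse()
--     return out
-- ===== Notes on version B (the rewrite author's own statement) =====
-- stated objective: alternative
-- what changed: B characterizes the result as the squares on the anti-diagonal of constant sum s = x + y tracked by the file a alone (rank recovered as s - a), walks from the closed-form board-edge end max(0, s-7) upward toward the start, and reverses into emission order, instead of A's two-coordinate walk from the start with per-step bound checks and a skip-the-start test.
import Mathlib
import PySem

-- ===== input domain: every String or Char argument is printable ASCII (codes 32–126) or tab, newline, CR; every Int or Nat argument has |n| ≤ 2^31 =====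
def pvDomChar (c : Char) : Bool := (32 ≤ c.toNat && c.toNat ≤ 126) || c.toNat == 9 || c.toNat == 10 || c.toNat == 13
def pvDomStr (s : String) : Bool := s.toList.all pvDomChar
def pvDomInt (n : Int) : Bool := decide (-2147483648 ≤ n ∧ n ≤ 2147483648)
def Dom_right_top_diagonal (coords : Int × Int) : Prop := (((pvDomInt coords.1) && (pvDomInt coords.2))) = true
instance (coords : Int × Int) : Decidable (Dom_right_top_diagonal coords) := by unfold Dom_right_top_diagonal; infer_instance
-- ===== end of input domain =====

-- B tracks only the file a on the anti-diagonal of constant sum s = x + y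
-- (rank = s - a), walking from the board-edge end max(0, s - 7) up toward the
-- start and reversing; objective: alternative (same cost, different algorithm).


-- ===== PORT A =====
-- the while-loop: state (x, y), appends (x, y) unless it equals coords
def rtdLoop (coords : Int × Int) (x y : Int) : List (Int × Int) :=
  if x ≥ 0 ∧ y ≤ 7 then
    (if (x, y) ≠ coords then [(x, y)] else []) ++ rtdLoop coords (x - 1) (y + 1)
  else []
termination_by (8 - y).toNat
decreasing_by omega

def right_top_diagonal (coords : Int × Int) : List (Int × Int) :=
  rtdLoop coords coords.1 coords.2

-- ===== PORT B =====
-- Source B's while-loop: append (a, s - a) for files a ascending, a < x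
def antiDiagUp (s a x : Int) : List (Int × Int) :=
  if a < x then (a, s - a) :: antiDiagUp s (a + 1) x
  else []
termination_by (x - a).toNat
decreasing_by omega

def right_top_diagonal_alt (coords : Int × Int) : List (Int × Int) :=
  (antiDiagUp (coords.1 + coords.2) (max 0 (coords.1 + coords.2 - 7)) coords.1).reverse

-- ===== PRECONDITION & SPEC =====
def Spec_right_top_diagonal (coords : Int × Int) (out : List (Int × Int)) : Prop := out = right_top_diagonal_alt coords
instance (coords : Int × Int) (out : List (Int × Int)) : Decidable (Spec_right_top_diagonal coords out) := by unfold Spec_right_top_diagonal; infer_instance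

-- ===== CLAIM (what is proved, stated in full; the proofs are below) =====
def Claim_equal_right_top_diagonal : Prop := ∀ (coords : Int × Int), Dom_right_top_diagonal coords → Spec_right_top_diagonal coords (right_top_diagonal coords)

-- ===== LEMMAS AND PROOFS =====

-- proof-side helper: the same anti-diagonal listed by descending file
def antiDiagDown (s b lo : Int) : List (Int × Int) :=
  if b < lo then []
  else (b, s - b) :: antiDiagDown s (b - 1) lo
termination_by (b - lo + 1).toNat
decreasing_by omega

-- Past the start (cx < c.1) the skip test never fires; the loop from (cx, cy)
-- yields the anti-diagonal of sum cx + cy, files cx down to max 0 (cx+cy-7).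
theorem rtdLoop_eq_antiDiagDown (c : Int × Int) (cx cy : Int) (h : cx < c.1) :
    rtdLoop c cx cy = antiDiagDown (cx + cy) cx (max 0 (cx + cy - 7)) := by
  rw [rtdLoop, antiDiagDown]
  by_cases hb : cx ≥ 0 ∧ cy ≤ 7
  · rw [if_pos hb, if_neg (by omega : ¬ cx < max 0 (cx + cy - 7))]
    have hne : (cx, cy) ≠ c := fun he => absurd (congrArg Prod.fst he) (by simpa using h.ne)
    rw [if_pos hne]
    rw [rtdLoop_eq_antiDiagDown c (cx - 1) (cy + 1) (by omega)]
    have hs : cx - 1 + (cy + 1) = cx + cy := by ring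
    rw [hs]
    simp
  · rw [if_neg hb, if_pos (by omega : cx < max 0 (cx + cy - 7))]
termination_by (8 - cy).toNat
decreasing_by omega

-- snoc form of the ascending walk: extending the upper bound by one appends
theorem antiDiagUp_snoc (s lo b : Int) (h : lo ≤ b) :
    antiDiagUp s lo (b + 1) = antiDiagUp s lo b ++ [(b, s - b)] := by
  rw [antiDiagUp, if_pos (by omega : lo < b + 1)]
  by_cases hlt : lo < b
  · rw [antiDiagUp_snoc s (lo + 1) b (by omega)]
    conv_rhs => rw [antiDiagUp]
    rw [if_pos hlt]
    simp
  · have heq : lo = b := by omega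
    subst heq
    rw [antiDiagUp, if_neg (by omega : ¬ lo + 1 < lo + 1),
        antiDiagUp, if_neg (by omega : ¬ lo < lo)]
    simp
termination_by (b - lo).toNat
decreasing_by omega

-- reversing the ascending walk gives the descending listing
theorem antiDiagUp_reverse (s b lo : Int) :
    (antiDiagUp s lo b).reverse = antiDiagDown s (b - 1) lo := by
  by_cases h : b ≤ lo
  · rw [antiDiagUp, if_neg (by omega : ¬ lo < b),
        antiDiagDown, if_pos (by omega : b - 1 < lo)]
    simp
  · have h1 := antiDiagUp_snoc s lo (b - 1) (by omega)
    rw [show b - 1 + 1 = b by ring] at h1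
    rw [h1, List.reverse_append, antiDiagUp_reverse s (b - 1) lo]
    conv_rhs => rw [antiDiagDown]
    rw [if_neg (by omega : ¬ b - 1 < lo)]
    simp
termination_by (b - lo + 1).toNat
decreasing_by omega

-- ===== VERDICT (by name: the statement is the Claim_ definition above) =====
theorem right_top_diagonal_spec : Claim_equal_right_top_diagonal := by
  intro c _
  obtain ⟨x, y⟩ := c
  show rtdLoop (x, y) x y = right_top_diagonal_alt (x, y)
  unfold right_top_diagonal_alt
  rw [antiDiagUp_reverse]
  rw [rtdLoop]
  split_ifs with hb hne
  · exact absurd rfl hne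
  · rw [rtdLoop_eq_antiDiagDown (x, y) (x - 1) (y + 1) (by omega)]
    have hs : x - 1 + (y + 1) = x + y := by ring
    rw [hs]
    simp
  · rw [antiDiagDown, if_pos (by simp at hb; omega : (x, y).1 - 1 < max 0 ((x, y).1 + (x, y).2 - 7))]
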